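-- pv_equiv track=rewrite | github.com/BerndSinger/Checkio_Solutions | Elementary/Three_Words.py | hello
-- ===== SOURCE A (Python) =====
-- def hello(new_str1):
--
--     counter_words=0
--     for i in new_str1:
--         if i.isalpha():
--             counter_words=counter_words+1
--             if counter_words >= 3:
--                 return True
--                 break
--         else:
--             counter_words=0
--
--     return False
-- ===== SOURCE B (Python) =====
-- def hello(new_str1):
--     return any(new_str1[i:i+3].isalpha() for i in range(len(new_str1) - 2))
-- ===== Notes on version B (the rewrite author's own statement) =====
-- stated objective: idiomatic
-- what changed: Replaces the running counter that is incremented/reset per character with a sliding-window any() over all 3-character slices tested with str.isalpha().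
import Mathlib
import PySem

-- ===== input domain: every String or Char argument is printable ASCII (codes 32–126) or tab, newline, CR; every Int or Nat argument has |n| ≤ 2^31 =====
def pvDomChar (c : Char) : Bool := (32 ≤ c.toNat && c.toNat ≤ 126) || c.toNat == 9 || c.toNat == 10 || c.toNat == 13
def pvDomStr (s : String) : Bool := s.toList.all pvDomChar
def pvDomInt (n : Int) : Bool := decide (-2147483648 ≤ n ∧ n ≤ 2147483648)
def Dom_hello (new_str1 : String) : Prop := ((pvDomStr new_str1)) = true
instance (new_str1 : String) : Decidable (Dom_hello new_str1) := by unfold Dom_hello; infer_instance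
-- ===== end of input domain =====

-- B replaces A's running counter (incremented per alpha char, reset otherwise) with a
-- sliding-window any() over all 3-character slices tested with isalpha (idiomatic, not faster).

-- ===== PORT A =====
-- the for-loop with the running counter and the early `return True`
def helloLoop : List Char → Nat → Bool
  | [], _ => false
  | c :: rest, counter =>
    if PySem.Chars.isalpha c then
      if counter + 1 ≥ 3 then true
      else helloLoop rest (counter + 1)
    else helloLoop rest 0

def hello (new_str1 : String) : Bool := helloLoop new_str1.toList 0

-- ===== PORT B =====
def hello_alt (new_str1 : String) : Bool :=
  let cs := new_str1.toList
  (PySem.List.pyRange 0 ((cs.length : Int) - 2) 1).any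
    (fun i => PySem.Chars.strIsalpha (PySem.List.slice cs (some i) (some (i + 3))))

-- ===== PRECONDITION & SPEC =====
def Spec_hello (new_str1 : String) (out : Bool) : Prop := out = hello_alt new_str1
instance (new_str1 : String) (out : Bool) : Decidable (Spec_hello new_str1 out) := by unfold Spec_hello; infer_instance

-- ===== CLAIM (what is proved, stated in full; the proofs are below) =====
def Claim_equal_hello : Prop := ∀ (new_str1 : String), Dom_hello new_str1 → Spec_hello new_str1 (hello new_str1)

-- ===== LEMMAS AND PROOFS =====

-- "the 3-window of cs starting at i is all alphabetic"
def pvWin (cs : List Char) (i : Nat) : Prop := ((cs.drop i).take 3).all PySem.Chars.isalpha = true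

-- "the first n characters exist and are all alphabetic"
def pvHead (cs : List Char) (n : Nat) : Prop := n ≤ cs.length ∧ (cs.take n).all PySem.Chars.isalpha = true

theorem pvHead_mono {cs : List Char} {m n : Nat} (h : n ≤ m) (hm : pvHead cs m) : pvHead cs n := by
  obtain ⟨hlen, hall⟩ := hm
  refine ⟨le_trans h hlen, ?_⟩
  rw [List.all_eq_true] at hall ⊢
  intro x hx
  have hx' : x ∈ List.take m cs := by
    have : List.take n cs = List.take n (List.take m cs) := by
      rw [List.take_take, Nat.min_eq_left h]
    exact List.take_subset n _ (this ▸ hx)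
  exact hall x hx'

theorem pvHead_three {cs : List Char} (h : pvHead cs 3) :
    ∃ i, i + 3 ≤ cs.length ∧ pvWin cs i :=
  ⟨0, by simpa using h.1, by simpa [pvWin] using h.2⟩

theorem helloLoop_iff (cs : List Char) (k : Nat) (hk : k ≤ 2) :
    helloLoop cs k = true ↔ pvHead cs (3 - k) ∨ ∃ i, i + 3 ≤ cs.length ∧ pvWin cs i := by
  induction cs generalizing k with
  | nil =>
    simp only [helloLoop]
    constructor
    · intro h; simp at h
    · rintro (⟨hlen, _⟩ | ⟨i, hi, _⟩)
      · simp only [List.length_nil] at hlen; omega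
      · simp only [List.length_nil] at hi; omega
  | cons c rest ih =>
    by_cases hc : PySem.Chars.isalpha c = true
    · by_cases hk2 : k = 2
      · subst hk2
        have hstep : helloLoop (c :: rest) 2 = true := by
          simp only [helloLoop]
          rw [if_pos hc, if_pos (by omega : 2 + 1 ≥ 3)]
        rw [hstep]
        constructor
        · intro _
          refine Or.inl ⟨?_, ?_⟩
          · simp only [List.length_cons]; omega
          · show ((c :: rest).take (3 - 2)).all _ = true
            simp [hc]
        · intro _; rfl
      · have hk1 : k + 1 ≤ 2 := by omega
        have hstep : helloLoop (c :: rest) k = helloLoop rest (k + 1) := by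
          simp only [helloLoop]
          rw [if_pos hc, if_neg (by omega : ¬ k + 1 ≥ 3)]
        rw [hstep, ih (k + 1) hk1]
        have hsub : 3 - (k + 1) = 2 - k := by omega
        rw [hsub]
        constructor
        · rintro (hh | ⟨i, hi, hw⟩)
          · -- head-run of rest extends to head-run of c :: rest
            left
            refine ⟨?_, ?_⟩
            · have := hh.1; simp only [List.length_cons]; omega
            · have h3k : 3 - k = (2 - k) + 1 := by omega
              rw [h3k, List.take_succ_cons, List.all_cons, hc, Bool.true_and]
              exact hh.2
          · exact Or.inr ⟨i + 1, by simp only [List.length_cons]; omega, by simpa [pvWin] using hw⟩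
        · rintro (hh | ⟨i, hi, hw⟩)
          · left
            obtain ⟨hlen, hall⟩ := hh
            have h3k : 3 - k = (2 - k) + 1 := by omega
            rw [h3k, List.take_succ_cons, List.all_cons] at hall
            refine ⟨by simp only [List.length_cons] at hlen; omega, ?_⟩
            simpa [hc] using hall
          · cases i with
            | zero =>
              -- window at 0 of c :: rest gives a head-run of rest of length 2
              left
              have h2 : pvHead rest 2 := by
                refine ⟨by simp only [List.length_cons] at hi; omega, ?_⟩
                simp only [pvWin, List.drop_zero] at hw
                rw [show (3 : Nat) = 2 + 1 from rfl, List.take_succ_cons, List.all_cons] at hw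
                simpa [hc] using hw
              exact pvHead_mono (by omega) h2
            | succ j =>
              exact Or.inr ⟨j, by simp only [List.length_cons] at hi; omega, by simpa [pvWin] using hw⟩
    · have hstep : helloLoop (c :: rest) k = helloLoop rest 0 := by
        simp only [helloLoop, hc]; rfl
      rw [hstep, ih 0 (by omega)]
      constructor
      · rintro (hh | ⟨i, hi, hw⟩)
        · -- pvHead rest 3 is the window at index 1 of c :: rest
          obtain ⟨i, hi, hw⟩ := pvHead_three hh
          exact Or.inr ⟨i + 1, by simp only [List.length_cons]; omega, by simpa [pvWin] using hw⟩
        · exact Or.inr ⟨i + 1, by simp only [List.length_cons]; omega, by simpa [pvWin] using hw⟩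
      · rintro (hh | ⟨i, hi, hw⟩)
        · -- head-run of c :: rest of length 3 - k ≥ 1 would start with non-alpha c
          exfalso
          obtain ⟨hlen, hall⟩ := hh
          have h3k : 3 - k = (2 - k) + 1 := by omega
          rw [h3k, List.take_succ_cons, List.all_cons] at hall
          simp [hc] at hall
        · cases i with
          | zero =>
            exfalso
            simp only [pvWin, List.drop_zero] at hw
            rw [show (3 : Nat) = 2 + 1 from rfl, List.take_succ_cons, List.all_cons] at hw
            simp [hc] at hw
          | succ j =>
            exact Or.inr ⟨j, by simp only [List.length_cons] at hi; omega, by simpa [pvWin] using hw⟩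

theorem hello_alt_iff (s : String) :
    hello_alt s = true ↔ ∃ i, i + 3 ≤ s.toList.length ∧ pvWin s.toList i := by
  unfold hello_alt
  rw [List.any_eq_true]
  constructor
  · rintro ⟨x, hx, hsl⟩
    rw [PySem.List.mem_pyRange_one] at hx
    obtain ⟨hx0, hxlt⟩ := hx
    refine ⟨x.toNat, by omega, ?_⟩
    rw [PySem.List.slice_of_nonneg _ hx0 (by omega) (by omega) (by omega)] at hsl
    have h3 : (x + 3).toNat - x.toNat = 3 := by omega
    rw [h3] at hsl
    unfold PySem.Chars.strIsalpha at hsl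
    rw [Bool.and_eq_true] at hsl
    exact hsl.2
  · rintro ⟨i, hi, hw⟩
    refine ⟨(i : Int), ?_, ?_⟩
    · rw [PySem.List.mem_pyRange_one]; omega
    · rw [PySem.List.slice_of_nonneg _ (by omega) (by omega) (by omega) (by omega)]
      have h3 : ((i : Int) + 3).toNat - (i : Int).toNat = 3 := by omega
      rw [h3, Int.toNat_natCast]
      unfold PySem.Chars.strIsalpha
      rw [Bool.and_eq_true]
      refine ⟨?_, hw⟩
      have hlen : ((s.toList.drop i).take 3).length = 3 := by
        simp only [List.length_take, List.length_drop]; omega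
      simp [← List.length_eq_zero_iff, hlen]

-- ===== VERDICT (by name: the statement is the Claim_ definition above) =====
theorem hello_spec : Claim_equal_hello := by
  intro s _
  unfold Spec_hello hello
  rw [Bool.eq_iff_iff, helloLoop_iff s.toList 0 (by omega), hello_alt_iff]
  constructor
  · rintro (hh | h)
    · exact pvHead_three hh
    · exact h
  · exact Or.inr
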